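-- pv_equiv track=rewrite | github.com/hjw705/Algorithm | 프로그래머스/모의고사.py | solution
-- ===== SOURCE A (Python) =====
-- def solution(answers):
--     student1 = [1, 2, 3, 4, 5]
--     student2 = [2, 1, 2, 3, 2, 4, 2, 5]
--     student3 = [3, 3, 1, 1, 2, 2, 4, 4, 5, 5]
--     sum = [0,0,0] # 각 수포자들이 정답 리스트의 요소들과 비교를 한 후, 같을 경우 sum이 +1 되는 부분 초기화
--     answer = [] # 최종 반환할 리스트 초기화
--
--     # 정답 리스트와 비교하여 각각의 수포자들 주기에 따른 value 값 비교
--     for key, value in enumerate(answers):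
--         if value == student1 [key % 5]:
--             sum[0] += 1
--         if value == student2 [key % 8]:
--             sum[1] += 1
--         if value == student3 [key % 10]:
--             sum[2] += 1
--
--     # 3명의 수포자들의 sum 값 담는 리스트, 'result'
--     result = [sum[0], sum[1], sum[2]]
--
--     # 최댓값의 result 리스트와 result 의 값이 같을 경우, 반환 리스트 처리
--     for key, value in enumerate(result):
--         if value == max(result):
--             answer.append(key+1)
--     return answer
-- ===== SOURCE B (Python) =====
-- def solution(answers):
--     # Histogram algorithm: one pass builds a table keyed by (position mod 40, value)
--     # (40 = lcm of the three pattern lengths), then each student's score is a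
--     # 40-term table-lookup sum -- no scan of `answers` during scoring.
--     keys = [(i % 40, a) for i, a in enumerate(answers)]
--     hist = {}
--     for k in keys:
--         hist[k] = hist.get(k, 0) + 1
--     patterns = [
--         [1, 2, 3, 4, 5],
--         [2, 1, 2, 3, 2, 4, 2, 5],
--         [3, 3, 1, 1, 2, 2, 4, 4, 5, 5],
--     ]
--     scores = [
--         sum(hist.get((r, pat[r % len(pat)]), 0) for r in range(40))
--         for pat in patterns
--     ]
--     best = max(scores)
--     return [i + 1 for i, s in enumerate(scores) if s == best]
-- ===== Notes on version B (the rewrite author's own statement) =====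
-- stated objective: alternative
-- what changed: B builds a one-pass histogram keyed by (index mod 40, value) (40 = lcm of the pattern lengths) and computes each student's score as a 40-term table-lookup sum, replacing A's per-element pattern comparisons inside the scan.
import Mathlib
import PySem

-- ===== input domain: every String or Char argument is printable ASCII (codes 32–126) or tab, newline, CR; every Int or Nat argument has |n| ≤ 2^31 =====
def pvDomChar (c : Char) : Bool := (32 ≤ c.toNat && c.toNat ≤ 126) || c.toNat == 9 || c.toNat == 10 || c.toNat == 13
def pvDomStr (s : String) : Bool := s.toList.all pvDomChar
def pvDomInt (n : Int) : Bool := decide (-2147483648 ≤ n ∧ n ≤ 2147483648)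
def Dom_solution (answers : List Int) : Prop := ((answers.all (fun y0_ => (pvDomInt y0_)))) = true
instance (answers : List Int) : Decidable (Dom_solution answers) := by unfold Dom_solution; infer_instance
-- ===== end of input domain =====

-- B replaces A's combined modular-comparison scan by a histogram keyed by
-- (index mod 40, value) plus 40-term table-lookup sums (objective: alternative algorithm, same cost).

-- ===== PORT A =====
-- the three fixed answer patterns (literals shared by both ports)
def pvSt1 : List Int := [1, 2, 3, 4, 5]
def pvSt2 : List Int := [2, 1, 2, 3, 2, 4, 2, 5]
def pvSt3 : List Int := [3, 3, 1, 1, 2, 2, 4, 4, 5, 5]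

-- A's 'for key, value in enumerate(answers)' loop; pat[key % n] is always in
-- range for these fixed patterns, so getD is exact.
def pvALoop (k : Nat) (s : Int × Int × Int) : List Int → Int × Int × Int
  | [] => s
  | v :: vs =>
      pvALoop (k + 1)
        ((if v = pvSt1.getD (k % 5) 0 then s.1 + 1 else s.1),
         (if v = pvSt2.getD (k % 8) 0 then s.2.1 + 1 else s.2.1),
         (if v = pvSt3.getD (k % 10) 0 then s.2.2 + 1 else s.2.2)) vs

def solution (answers : List Int) : List Int :=
  let s := pvALoop 0 (0, 0, 0) answers
  let result := [s.1, s.2.1, s.2.2]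
  -- max(result): result is nonempty, so max? is some; getD 0 is exact
  let m := (PySem.List.max? result (fun x => x)).getD 0
  (PySem.List.enumerate result).foldl
    (fun acc kv => if kv.2 = m then acc ++ [kv.1 + 1] else acc) []

-- ===== PORT B =====
-- sum(hist.get((r, pat[r % len(pat)]), 0) for r in range(40)); pat index is
-- always in range for these fixed patterns, so pyGetD is exact.
def pvScoreB (hist : PySem.Dict (Int × Int) Int) (pat : List Int) : Int :=
  ((PySem.List.pyRange 0 40 1).map
    (fun r => hist.getD (r, PySem.List.pyGetD pat (PySem.Int.mod r (pat.length : Int)) 0) 0)).sum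

def solution_alt (answers : List Int) : List Int :=
  -- keys = [(i % 40, a) for i, a in enumerate(answers)]
  let keys := (PySem.List.enumerate answers).map
    (fun p => (PySem.Int.mod p.1 40, p.2))
  -- for k in keys: hist[k] = hist.get(k, 0) + 1
  let hist := keys.foldl (fun d k => d.insert k (d.getD k 0 + 1)) PySem.Dict.empty
  let scores := [pvScoreB hist pvSt1, pvScoreB hist pvSt2, pvScoreB hist pvSt3]
  -- max(scores): nonempty, getD 0 exact
  let best := (PySem.List.max? scores (fun x => x)).getD 0
  (PySem.List.enumerate scores).filterMap
    (fun kv => if kv.2 = best then some (kv.1 + 1) else none)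

-- ===== PRECONDITION & SPEC =====
def Spec_solution (answers : List Int) (out : List Int) : Prop := out = solution_alt answers
instance (answers : List Int) (out : List Int) : Decidable (Spec_solution answers out) := by unfold Spec_solution; infer_instance

-- ===== CLAIM (what is proved, stated in full; the proofs are below) =====
def Claim_equal_solution : Prop := ∀ (answers : List Int), Dom_solution answers → Spec_solution answers (solution answers)

-- ===== LEMMAS AND PROOFS =====

-- single-pattern count with modular indexing (one component of A's loop)
def pvCnt (pat : List Int) (n : Nat) : Nat → List Int → Int
  | _, [] => 0
  | k, v :: vs => (if v = pat.getD (k % n) 0 then 1 else 0) + pvCnt pat n (k + 1) vs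

-- A's loop splits into the three independent counts
theorem pvALoop_split (vs : List Int) (k : Nat) (s1 s2 s3 : Int) :
    pvALoop k (s1, s2, s3) vs =
      (s1 + pvCnt pvSt1 5 k vs, s2 + pvCnt pvSt2 8 k vs, s3 + pvCnt pvSt3 10 k vs) := by
  induction vs generalizing k s1 s2 s3 with
  | nil => simp [pvALoop, pvCnt]
  | cons v vs ih =>
      rw [pvALoop, ih, pvCnt, pvCnt, pvCnt]
      simp only [pvSt1, pvSt2, pvSt3]
      split_ifs <;> simp only [Prod.mk.injEq] <;> exact ⟨by ring, by ring, by ring⟩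

-- a 0/1 pointwise sum over a Nodup list hitting x.1 exactly once
theorem pvSumIte (f : Int → Int) (x : Int × Int) :
    ∀ (R : List Int), R.Nodup → x.1 ∈ R →
    (R.map (fun r => if x = (r, f r) then (1 : Int) else 0)).sum
      = if x.2 = f x.1 then 1 else 0 := by
  intro R
  induction R with
  | nil => intro _ h; cases h
  | cons r R ih =>
      intro hnd hmem
      have hnd' := (List.nodup_cons.mp hnd)
      rcases List.mem_cons.mp hmem with h1 | h1
      · -- x.1 = r: head decides, tail contributes 0
        have htail : (R.map (fun r' => if x = (r', f r') then (1 : Int) else 0)).sum = 0 := by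
          apply List.sum_eq_zero
          intro y hy
          rcases List.mem_map.mp hy with ⟨r', hr', hrfl⟩
          have hne : x ≠ (r', f r') := by
            intro hx
            have hrr : r = r' := by rw [← h1, hx]
            exact hnd'.1 (hrr ▸ hr')
          simp [hne] at hrfl
          omega
        have hx : (x = (r, f r)) ↔ (x.2 = f x.1) := by
          constructor
          · intro h; rw [h1, h]
          · intro h
            have : x = (x.1, x.2) := rfl
            rw [this, h1, h, h1]
        simp only [List.map_cons, List.sum_cons, htail, add_zero]
        split_ifs with h2 h3 h3 <;> first | rfl | (exact absurd (hx.mp h2) h3) | (exact absurd (hx.mpr h3) h2)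
      · -- x.1 ∈ R: head is 0
        have hne : x ≠ (r, f r) := by
          intro hx
          have hxr : x.1 = r := by rw [hx]
          exact hnd'.1 (hxr ▸ h1)
        simp only [List.map_cons, List.sum_cons, if_neg hne, zero_add]
        exact ih hnd'.2 h1

-- the histogram sum collapses to a single countP over the key list
theorem pvSumCount (f : Int → Int) (R : List Int) (hR : R.Nodup) :
    ∀ (kl : List (Int × Int)), (∀ k ∈ kl, k.1 ∈ R) →
    (R.map (fun r => ((kl.count (r, f r) : Nat) : Int))).sum
      = ((kl.countP (fun k => decide (k.2 = f k.1)) : Nat) : Int) := by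
  intro kl
  induction kl with
  | nil => intro _; simp
  | cons x kl ih =>
      intro hmem
      have hsplit : ∀ r : Int,
          (((x :: kl).count (r, f r) : Nat) : Int)
            = ((kl.count (r, f r) : Nat) : Int) + (if x = (r, f r) then (1 : Int) else 0) := by
        intro r
        rw [List.count_cons]
        by_cases h : x = (r, f r)
        · have h' : (r, f r) = x := h.symm
          simp only [h', BEq.rfl]
          push_cast
          ring
        · have h' : ¬((r, f r) = x) := fun hc => h hc.symm
          simp [h, h']
      calc (R.map (fun r => (((x :: kl).count (r, f r) : Nat) : Int))).sum
          = (R.map (fun r => ((kl.count (r, f r) : Nat) : Int)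
              + (if x = (r, f r) then (1 : Int) else 0))).sum := by
            congr 1; exact List.map_congr_left (fun r _ => hsplit r)
        _ = (R.map (fun r => ((kl.count (r, f r) : Nat) : Int))).sum
              + (R.map (fun r => if x = (r, f r) then (1 : Int) else 0)).sum := by
            rw [← List.sum_map_add]
        _ = ((kl.countP (fun k => decide (k.2 = f k.1)) : Nat) : Int)
              + (if x.2 = f x.1 then 1 else 0) := by
            rw [ih (fun k hk => hmem k (List.mem_cons_of_mem _ hk)),
                pvSumIte f x R hR (hmem x (List.mem_cons_self))]
        _ = (((x :: kl).countP (fun k => decide (k.2 = f k.1)) : Nat) : Int) := by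
            rw [List.countP_cons]
            push_cast
            by_cases h : x.2 = f x.1 <;> simp [h]

-- the enumerate countP is the modular-index count, for n ∣ 40
theorem pvCntP (pat : List Int) (n : Nat) (hn : pat.length = n)
    (hdvd : n ∣ 40) :
    ∀ (vs : List Int) (k : Nat),
    (((PySem.List.enumerate vs (k : Int)).countP
        (fun p => decide (p.2 = PySem.List.pyGetD pat
          (PySem.Int.mod (PySem.Int.mod p.1 40) ((pat.length : Nat) : Int)) 0)) : Nat) : Int)
      = pvCnt pat n k vs := by
  intro vs
  induction vs with
  | nil => intro k; simp [PySem.List.enumerate_nil, pvCnt]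
  | cons v vs ih =>
      intro k
      rw [PySem.List.enumerate_cons, pvCnt, List.countP_cons]
      have h40 : (40 : Int) = ((40 : Nat) : Int) := by norm_num
      have hidx : PySem.List.pyGetD pat
          (PySem.Int.mod (PySem.Int.mod (k : Int) 40) ((pat.length : Nat) : Int)) 0
            = pat.getD (k % n) 0 := by
        rw [h40, PySem.Int.mod_natCast k 40, PySem.Int.mod_natCast (k % 40) pat.length,
            PySem.List.pyGetD_natCast]
        rw [hn, Nat.mod_mod_of_dvd k hdvd]
      have hk1 : ((k : Int) + 1) = ((k + 1 : Nat) : Int) := by push_cast; ring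
      have ih' := ih (k + 1)
      rw [← hk1] at ih'
      push_cast
      rw [ih', hidx]
      by_cases h : v = pat.getD (k % n) 0 <;> simp [h] <;> ring

-- B's score equals A's modular count for each pattern
theorem pvScoreB_eq (pat : List Int) (n : Nat) (hn : pat.length = n)
    (hdvd : n ∣ 40) (answers : List Int) :
    pvScoreB
      (((PySem.List.enumerate answers).map (fun p => (PySem.Int.mod p.1 40, p.2))).foldl
        (fun d k => d.insert k (d.getD k 0 + 1)) PySem.Dict.empty) pat
      = pvCnt pat n 0 answers := by
  set keys := (PySem.List.enumerate answers).map (fun p => (PySem.Int.mod p.1 40, p.2)) with hkeys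
  set f : Int → Int := fun r => PySem.List.pyGetD pat (PySem.Int.mod r ((pat.length : Nat) : Int)) 0 with hf
  have hget : ∀ r : Int,
      (keys.foldl (fun d k => d.insert k (d.getD k 0 + 1)) PySem.Dict.empty).getD (r, f r) 0
        = ((keys.count (r, f r) : Nat) : Int) := by
    intro r
    rw [PySem.Dict.getD_foldl_insert_add_one, PySem.Dict.getD_empty, zero_add]
  have hmemR : ∀ k ∈ keys, k.1 ∈ PySem.List.pyRange 0 40 1 := by
    intro k hk
    rcases List.mem_map.mp hk with ⟨p, _, hrfl⟩
    rw [← hrfl]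
    rw [PySem.List.mem_pyRange_one]
    exact ⟨PySem.Int.mod_nonneg p.1 (by norm_num), PySem.Int.mod_lt p.1 (by norm_num)⟩
  have hstep : pvScoreB (keys.foldl (fun d k => d.insert k (d.getD k 0 + 1)) PySem.Dict.empty) pat
      = ((PySem.List.pyRange 0 40 1).map (fun r => ((keys.count (r, f r) : Nat) : Int))).sum := by
    unfold pvScoreB
    congr 1
    exact List.map_congr_left (fun r _ => hget r)
  rw [hstep, pvSumCount f _ (PySem.List.nodup_pyRange_one 0 40) keys hmemR]
  have hcntP : keys.countP (fun k => decide (k.2 = f k.1))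
      = (PySem.List.enumerate answers).countP
          (fun p => decide (p.2 = f (PySem.Int.mod p.1 40))) := by
    rw [hkeys, List.countP_map]
    rfl
  rw [hcntP]
  have := pvCntP pat n hn hdvd answers 0
  simpa [hf] using this

-- the two winner-collection shapes agree on a 3-element list
theorem pvCollect_eq (s1 s2 s3 m : Int) :
    (PySem.List.enumerate [s1, s2, s3]).foldl
        (fun acc kv => if kv.2 = m then acc ++ [kv.1 + 1] else acc) ([] : List Int) =
      (PySem.List.enumerate [s1, s2, s3]).filterMap
        (fun kv => if kv.2 = m then some (kv.1 + 1) else none) := by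
  simp [PySem.List.enumerate_cons, PySem.List.enumerate_nil, List.filterMap]
  split_ifs <;> simp

-- ===== VERDICT (by name: the statement is the Claim_ definition above) =====
theorem solution_spec : Claim_equal_solution := by
  intro answers _
  unfold Spec_solution
  simp only [solution, solution_alt]
  rw [pvALoop_split]
  rw [pvScoreB_eq pvSt1 5 rfl (by norm_num) answers,
      pvScoreB_eq pvSt2 8 rfl (by norm_num) answers,
      pvScoreB_eq pvSt3 10 rfl (by norm_num) answers]
  simp only [zero_add]
  exact pvCollect_eq _ _ _ _
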